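-- pv_equiv track=rewrite | github.com/qiyili-caley/AtlasSpine | post_processing.py | keep_17_vertebrae
-- ===== SOURCE A (Python) =====
-- def keep_17_vertebrae(bone_info):
--     bone_info = sorted(bone_info, key=lambda x: x['cy'])
--     n = len(bone_info)
--     if n <= 17:
--         kept = bone_info
--     elif 18 <= n <= 20:
--         kept = bone_info[n-17:n]
--     else:
--         kept = bone_info[3:20]
--     for i, b in enumerate(kept, 1):
--         b['id'] = i
--     return kept
-- ===== SOURCE B (Python) =====
-- def keep_17_vertebrae(bone_info):
--     # Single pass: maintain a sorted buffer of at most the 20 smallest-by-cy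
--     # dicts (stable: inserted after equal cy values), instead of sorting all.
--     buf = []
--     for b in bone_info:
--         i = 0
--         while i < len(buf) and buf[i]['cy'] <= b['cy']:
--             i += 1
--         buf.insert(i, b)
--         if len(buf) > 20:
--             buf.pop()
--     start = min(max(len(bone_info) - 17, 0), 3)
--     kept = buf[start:start + 17]
--     for i, b in enumerate(kept, 1):
--         b['id'] = i
--     return kept
-- ===== Notes on version B (the rewrite author's own statement) =====
-- stated objective: alternative
-- what changed: Instead of fully sorting and then choosing among three slice branches, B makes one pass keeping a stable sorted buffer of at most the 20 smallest-by-'cy' dicts (bounded insertion, dropping the largest when the buffer overflows) and takes the clamped window buf[start:start+17] with start=min(max(n-17,0),3).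
import Mathlib
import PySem

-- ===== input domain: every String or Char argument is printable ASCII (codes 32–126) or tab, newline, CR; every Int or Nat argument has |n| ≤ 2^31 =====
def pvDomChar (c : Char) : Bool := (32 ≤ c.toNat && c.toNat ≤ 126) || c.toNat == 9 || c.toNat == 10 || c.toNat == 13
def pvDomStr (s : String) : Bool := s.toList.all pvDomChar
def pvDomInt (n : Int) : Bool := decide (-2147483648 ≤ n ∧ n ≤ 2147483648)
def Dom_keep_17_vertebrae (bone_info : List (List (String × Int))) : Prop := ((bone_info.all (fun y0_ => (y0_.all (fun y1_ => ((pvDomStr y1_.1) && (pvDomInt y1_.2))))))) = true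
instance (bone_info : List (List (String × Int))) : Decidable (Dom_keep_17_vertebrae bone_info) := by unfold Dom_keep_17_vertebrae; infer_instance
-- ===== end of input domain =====

-- B replaces A's full sort + three-branch slicing by one pass keeping a stable sorted buffer of
-- at most the 20 smallest-by-'cy' dicts, then the clamped window buf[start:start+17];
-- equivalence is about the RETURN value (both Pythons also mutate the kept dicts identically in place).


-- shared dict primitives on the association-list encoding of a Python dict (unique keys):
-- x['cy'] lookup (default never used under Pre_, where 'cy' is always present)
def pvLookupD (d : List (String × Int)) (k : String) (dflt : Int) : Int :=
  match d with
  | [] => dflt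
  | (k', v') :: rest => if k' = k then v' else pvLookupD rest k dflt

-- b[k] = v : overwrite the (unique) existing entry in place, else append — Python dict assignment
def pvSetKey (d : List (String × Int)) (k : String) (v : Int) : List (String × Int) :=
  match d with
  | [] => [(k, v)]
  | (k', v') :: rest => if k' = k then (k, v) :: rest else (k', v') :: pvSetKey rest k v

-- ===== PORT A =====
def keep_17_vertebrae (bone_info : List (List (String × Int))) : List (List (String × Int)) :=
  let bs := PySem.List.sorted bone_info (fun d => pvLookupD d "cy" 0) false
  let n : Int := bs.length
  let kept :=
    if n ≤ 17 then bs
    else if 18 ≤ n ∧ n ≤ 20 then PySem.List.slice bs (some (n - 17)) (some n)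
    else PySem.List.slice bs (some 3) (some 20)
  (PySem.List.enumerate kept 1).map (fun p => pvSetKey p.2 "id" p.1)

-- ===== PORT B =====
-- B's inner while-loop + list.insert: walk past every buffered dict with cy ≤ the new one's cy
-- (stable), insert there
def pvBufInsert (x : List (String × Int)) (buf : List (List (String × Int))) :
    List (List (String × Int)) :=
  match buf with
  | [] => [x]
  | y :: ys =>
      if pvLookupD y "cy" 0 ≤ pvLookupD x "cy" 0 then y :: pvBufInsert x ys else x :: y :: ys

def keep_17_vertebrae_alt (bone_info : List (List (String × Int))) : List (List (String × Int)) :=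
  let buf := bone_info.foldl
    (fun buf b =>
      let buf2 := pvBufInsert b buf
      -- buf.pop() when the buffer holds more than 20 elements removes the last one = dropLast
      if 20 < buf2.length then buf2.dropLast else buf2) []
  -- min(max(n-17,0),3): Nat subtraction is exactly max(n-17,0)
  let start := min (bone_info.length - 17) 3
  -- buf[start:start+17] with a nonnegative in-range start is exactly drop/take
  let kept := (buf.drop start).take 17
  (PySem.List.enumerate kept 1).map (fun p => pvSetKey p.2 "id" p.1)

-- ===== PRECONDITION & SPEC =====
-- Pre_ excludes dicts missing the key 'cy', on which both Pythons raise KeyError.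
def Pre_keep_17_vertebrae (bone_info : List (List (String × Int))) : Prop :=
  ∀ d ∈ bone_info, "cy" ∈ d.map Prod.fst
instance (bone_info : List (List (String × Int))) : Decidable (Pre_keep_17_vertebrae bone_info) := by unfold Pre_keep_17_vertebrae; infer_instance
def pvWitness_keep_17_vertebrae : (List (List (String × Int))) := ([[("cy", 5)], [("cy", 2), ("id", 9)]])

def Spec_keep_17_vertebrae (bone_info : List (List (String × Int))) (out : List (List (String × Int))) : Prop := out = keep_17_vertebrae_alt bone_info
instance (bone_info : List (List (String × Int))) (out : List (List (String × Int))) : Decidable (Spec_keep_17_vertebrae bone_info out) := by unfold Spec_keep_17_vertebrae; infer_instance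

-- ===== CLAIM (what is proved, stated in full; the proofs are below) =====
def Claim_equal_keep_17_vertebrae : Prop := ∀ (bone_info : List (List (String × Int))), Dom_keep_17_vertebrae bone_info → Pre_keep_17_vertebrae bone_info → Spec_keep_17_vertebrae bone_info (keep_17_vertebrae bone_info)

-- ===== LEMMAS AND PROOFS =====

-- abbreviation for the sort key used in the proofs
def pvKey (d : List (String × Int)) : Int := pvLookupD d "cy" 0

-- B's hand-written stable insertion is PySem's insertBy for the key 'cy'
theorem bufInsert_eq_insertBy (x : List (String × Int)) (buf : List (List (String × Int))) :
    pvBufInsert x buf = PySem.List.insertBy (fun a b => decide (pvKey a < pvKey b)) x buf := by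
  induction buf with
  | nil => rfl
  | cons y ys ih =>
      simp only [pvBufInsert, PySem.List.insertBy, pvKey, ih]
      by_cases h : pvLookupD y "cy" 0 ≤ pvLookupD x "cy" 0
      · rw [if_pos h, if_neg (by simpa using not_lt.mpr h)]
      · rw [if_neg h, if_pos (by simpa using lt_of_not_ge h)]

theorem length_insertBy (bf : List (String × Int) → List (String × Int) → Bool)
    (x : List (String × Int)) (l : List (List (String × Int))) :
    (PySem.List.insertBy bf x l).length = l.length + 1 := by
  induction l with
  | nil => rfl
  | cons y ys ih =>
      simp only [PySem.List.insertBy]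
      split <;> simp [ih]

-- inserting into a truncated buffer keeps the same first k elements
theorem take_insertBy_take (bf : List (String × Int) → List (String × Int) → Bool)
    (x : List (String × Int)) (l : List (List (String × Int))) (k : Nat) :
    (PySem.List.insertBy bf x (l.take k)).take k = (PySem.List.insertBy bf x l).take k := by
  induction l generalizing k with
  | nil => simp
  | cons y ys ih =>
      cases k with
      | zero => simp
      | succ m =>
          simp only [List.take_succ_cons, PySem.List.insertBy]
          split
          · rw [List.take_succ_cons]
            cases m with
            | zero => simp
            | succ j =>
                rw [List.take_succ_cons, List.take_succ_cons, List.take_take,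
                  Nat.min_eq_left (Nat.le_succ j), List.take_succ_cons]
          · simp [ih]

-- the fold with a capped buffer computes the first 20 of the full insertion sort
theorem fold_take20 (xs p : List (List (String × Int))) :
    xs.foldl
      (fun buf b =>
        let buf2 := pvBufInsert b buf
        if 20 < buf2.length then buf2.dropLast else buf2)
      ((p.foldl (fun acc x => PySem.List.insertBy (fun a b => decide (pvKey a < pvKey b)) x acc) []).take 20)
    = ((p ++ xs).foldl (fun acc x => PySem.List.insertBy (fun a b => decide (pvKey a < pvKey b)) x acc) []).take 20 := by
  induction xs generalizing p with
  | nil => simp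
  | cons x xs ih =>
      rw [List.foldl_cons]
      have hstep :
          (let buf2 := pvBufInsert x ((p.foldl (fun acc x => PySem.List.insertBy (fun a b => decide (pvKey a < pvKey b)) x acc) []).take 20)
           if 20 < buf2.length then buf2.dropLast else buf2)
          = (((p ++ [x]).foldl (fun acc x => PySem.List.insertBy (fun a b => decide (pvKey a < pvKey b)) x acc) []).take 20) := by
        set S := p.foldl (fun acc x => PySem.List.insertBy (fun a b => decide (pvKey a < pvKey b)) x acc) [] with hS
        have hlen : (pvBufInsert x (S.take 20)).length = (S.take 20).length + 1 := by
          rw [bufInsert_eq_insertBy, length_insertBy]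
        have htk : (pvBufInsert x (S.take 20)).take 20 = (PySem.List.insertBy (fun a b => decide (pvKey a < pvKey b)) x S).take 20 := by
          rw [bufInsert_eq_insertBy, take_insertBy_take]
        simp only [List.foldl_append, List.foldl_cons, List.foldl_nil, ← hS]
        by_cases h : 20 < (pvBufInsert x (S.take 20)).length
        · simp only [h, if_true]
          have h21 : (pvBufInsert x (S.take 20)).length = 21 := by
            have := List.length_take_le 20 S
            omega
          have : (pvBufInsert x (S.take 20)).dropLast = (pvBufInsert x (S.take 20)).take 20 := by
            rw [List.dropLast_eq_take, h21]
          rw [this, htk]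
        · simp only [h, if_false]
          have hle : (pvBufInsert x (S.take 20)).length ≤ 20 := by omega
          rw [← List.take_of_length_le hle, htk]
      rw [hstep, ih (p ++ [x])]
      simp

-- A's three branches and the clamped window pick the same sublist of the sorted list
theorem kept_eq (bs : List (List (String × Int))) :
    (if (bs.length : Int) ≤ 17 then bs
     else if 18 ≤ (bs.length : Int) ∧ (bs.length : Int) ≤ 20 then
       PySem.List.slice bs (some ((bs.length : Int) - 17)) (some (bs.length : Int))
     else PySem.List.slice bs (some 3) (some 20))
    = (bs.drop (min (bs.length - 17) 3)).take 17 := by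
  by_cases h1 : (bs.length : Int) ≤ 17
  · have h1' : bs.length ≤ 17 := by exact_mod_cast h1
    simp [h1, Nat.sub_eq_zero_of_le h1', List.take_of_length_le h1']
  · by_cases h2 : 18 ≤ (bs.length : Int) ∧ (bs.length : Int) ≤ 20
    · have h18 : 18 ≤ bs.length := by exact_mod_cast h2.1
      have h20 : bs.length ≤ 20 := by exact_mod_cast h2.2
      have hcast : ((bs.length : Int) - 17) = ((bs.length - 17 : Nat) : Int) := by omega
      rw [if_neg h1, if_pos h2, hcast, PySem.List.slice_natCast]
      have hmin : min (bs.length - 17) 3 = bs.length - 17 := by omega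
      have h17 : bs.length - (bs.length - 17) = 17 := by omega
      rw [hmin, h17]
    · have h21 : 21 ≤ bs.length := by
        rcases lt_or_ge bs.length 21 with h | h
        · exfalso; apply h2; constructor <;> [exact_mod_cast (by omega : 18 ≤ bs.length); exact_mod_cast (by omega : bs.length ≤ 20)]
        · exact h
      have hmin : min (bs.length - 17) 3 = 3 := by omega
      have h3 : (3 : Int) = ((3 : Nat) : Int) := by norm_num
      have h20 : (20 : Int) = ((20 : Nat) : Int) := by norm_num
      rw [if_neg h1, if_neg h2, h3, h20, PySem.List.slice_natCast, hmin]

-- the clamped window of the full sorted list equals the same window of its first 20 elements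
theorem window_take20 (bs : List (List (String × Int))) :
    ((bs.take 20).drop (min (bs.length - 17) 3)).take 17
      = (bs.drop (min (bs.length - 17) 3)).take 17 := by
  set s := min (bs.length - 17) 3 with hs
  have hsle : s ≤ 3 := by omega
  rw [List.drop_take, List.take_take]
  have : min 17 (20 - s) = 17 := by omega
  rw [this]

-- ===== VERDICT (by name: the statement is the Claim_ definition above) =====
theorem keep_17_vertebrae_spec : Claim_equal_keep_17_vertebrae := by
  intro bone_info _ _
  show keep_17_vertebrae bone_info = keep_17_vertebrae_alt bone_info
  simp only [keep_17_vertebrae, keep_17_vertebrae_alt]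
  rw [show (fun d => pvLookupD d "cy" 0) = pvKey from rfl]
  have hbuf := fold_take20 bone_info []
  simp only [List.foldl_nil, List.take_nil, List.nil_append] at hbuf
  rw [← PySem.List.sorted_eq_foldl_insertBy bone_info pvKey] at hbuf
  have hlen : (PySem.List.sorted bone_info pvKey false).length = bone_info.length :=
    PySem.List.length_sorted bone_info pvKey false
  rw [kept_eq (PySem.List.sorted bone_info pvKey false), hbuf, ← hlen, window_take20]
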